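-- pv_equiv track=rewrite | github.com/baeksangha/python_sw | 1208_Flatten/source.py | solution
-- ===== SOURCE A (Python) =====
-- def solution(n, boxes):
--     for i in range(n):
--         s = set(boxes)
--         if len(s) == 1 or (len(s) == 2 and max(s)-min(s) == 1):
--             break
--         boxes[boxes.index(max(boxes))] -= 1
--         boxes[boxes.index(min(boxes))] += 1
--     return max(boxes) - min(boxes)
-- ===== SOURCE B (Python) =====
-- # B keeps the multiset as a sorted list: each move pops both ends and re-inserts
-- # the two updated values, instead of A's per-step set() build and index() scans.
-- # Equivalence is about the return value only: A mutates `boxes` in place, B does not.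
-- def _ins(s, x):
--     i = 0
--     while i < len(s) and s[i] < x:
--         i += 1
--     return s[:i] + [x] + s[i:]
--
-- def solution(n, boxes):
--     s = sorted(boxes)
--     steps = n
--     while steps > 0 and s[-1] - s[0] >= 2:
--         lo = s[0] + 1
--         hi = s[-1] - 1
--         s = _ins(_ins(s[1:-1], lo), hi)
--         steps -= 1
--     return s[-1] - s[0]
-- ===== Notes on version B (the rewrite author's own statement) =====
-- stated objective: alternative
-- what changed: B sorts the boxes once and keeps the multiset as a sorted list, each move dropping the two ends and re-inserting min+1 and max-1 in order, instead of A's per-step set() construction and max/min/index scans over an unsorted list that it mutates in place (return value equivalence; A mutates its argument, B does not).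
import Mathlib
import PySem

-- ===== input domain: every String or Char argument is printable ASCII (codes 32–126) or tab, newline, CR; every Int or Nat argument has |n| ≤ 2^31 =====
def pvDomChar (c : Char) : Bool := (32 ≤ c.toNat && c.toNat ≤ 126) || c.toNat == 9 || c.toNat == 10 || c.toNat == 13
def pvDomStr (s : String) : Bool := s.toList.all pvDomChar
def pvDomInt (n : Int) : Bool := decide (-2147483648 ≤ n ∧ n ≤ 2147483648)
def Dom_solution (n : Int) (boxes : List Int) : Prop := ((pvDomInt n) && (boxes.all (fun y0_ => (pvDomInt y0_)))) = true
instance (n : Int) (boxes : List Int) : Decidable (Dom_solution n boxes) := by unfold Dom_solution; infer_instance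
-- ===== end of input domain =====

-- B keeps the multiset as a sorted list, dropping both ends and re-inserting the two updated
-- values each move, instead of A's per-step set() build and index scans (objective: alternative).
-- Equivalence is about the return value only: A mutates `boxes` in place, B does not.

-- ===== PORT A =====
-- the for-loop over range(n) with break: one recursive call per iteration, counted down
def solutionGo : Nat → List Int → List Int
  | 0, boxes => boxes
  | Nat.succ k, boxes =>
    let s : PySem.Set Int := PySem.Set.ofList boxes
    if s.length == 1 ||
        (s.length == 2 &&
          ((PySem.List.max? s (fun y => y)).getD 0 - (PySem.List.min? s (fun y => y)).getD 0 == 1)) then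
      boxes
    else
      let mx := (PySem.List.max? boxes (fun y => y)).getD 0
      let i := (PySem.List.index? boxes mx).getD 0
      let boxes1 := boxes.set i (boxes.getD i 0 - 1)
      let mn := (PySem.List.min? boxes1 (fun y => y)).getD 0
      let j := (PySem.List.index? boxes1 mn).getD 0
      let boxes2 := boxes1.set j (boxes1.getD j 0 + 1)
      solutionGo k boxes2

def solution (n : Int) (boxes : List Int) : Int :=
  let final := solutionGo n.toNat boxes
  (PySem.List.max? final (fun y => y)).getD 0 - (PySem.List.min? final (fun y => y)).getD 0

-- ===== PORT B =====
-- _ins: position scan (the while loop), then s[:i] + [x] + s[i:]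
def insPos : List Int → Int → Nat
  | [], _ => 0
  | y :: ys, x => if y < x then insPos ys x + 1 else 0

def insSorted (s : List Int) (x : Int) : List Int :=
  s.take (insPos s x) ++ [x] ++ s.drop (insPos s x)

-- the while loop: steps counts down from n (no iterations when n ≤ 0)
def solutionAltGo : Nat → List Int → List Int
  | 0, s => s
  | Nat.succ k, s =>
    if (PySem.List.pyGet? s (-1)).getD 0 - (PySem.List.pyGet? s 0).getD 0 ≥ 2 then
      let lo := (PySem.List.pyGet? s 0).getD 0 + 1
      let hi := (PySem.List.pyGet? s (-1)).getD 0 - 1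
      solutionAltGo k (insSorted (insSorted (PySem.List.slice s (some 1) (some (-1))) lo) hi)
    else s

def solution_alt (n : Int) (boxes : List Int) : Int :=
  let final := solutionAltGo n.toNat (PySem.List.sorted boxes (fun x => x) false)
  (PySem.List.pyGet? final (-1)).getD 0 - (PySem.List.pyGet? final 0).getD 0

-- ===== PRECONDITION & SPEC =====
-- A raises (max()/min() of an empty sequence) on boxes = []; excluded.
def Pre_solution (n : Int) (boxes : List Int) : Prop := boxes ≠ []
instance (n : Int) (boxes : List Int) : Decidable (Pre_solution n boxes) := by
  unfold Pre_solution; infer_instance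

def pvWitness_solution : Int × List Int := (3, [5, 1, 2])

def Spec_solution (n : Int) (boxes : List Int) (out : Int) : Prop := out = solution_alt n boxes
instance (n : Int) (boxes : List Int) (out : Int) : Decidable (Spec_solution n boxes out) := by unfold Spec_solution; infer_instance

-- ===== CLAIM (what is proved, stated in full; the proofs are below) =====
def Claim_equal_solution : Prop := ∀ (n : Int) (boxes : List Int), Dom_solution n boxes → Pre_solution n boxes → Spec_solution n boxes (solution n boxes)


-- ===== LEMMAS AND PROOFS =====

-- abbreviations used only by the proofs
def maxD (l : List Int) : Int := (PySem.List.max? l (fun y => y)).getD 0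
def minD (l : List Int) : Int := (PySem.List.min? l (fun y => y)).getD 0

lemma maxD_spec (l : List Int) (h : l ≠ []) : maxD l ∈ l ∧ ∀ y ∈ l, y ≤ maxD l := by
  obtain ⟨m, hm⟩ : ∃ m, PySem.List.max? l (fun y => y) = some m := by
    cases hmx : PySem.List.max? l (fun y => y) with
    | none => exact absurd ((PySem.List.max?_eq_none_iff l _).mp hmx) h
    | some m => exact ⟨m, rfl⟩
  rw [maxD, hm]
  exact ⟨PySem.List.max?_mem hm, PySem.List.max?_isMax hm⟩

lemma minD_spec (l : List Int) (h : l ≠ []) : minD l ∈ l ∧ ∀ y ∈ l, minD l ≤ y := by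
  obtain ⟨m, hm⟩ : ∃ m, PySem.List.min? l (fun y => y) = some m := by
    cases hmx : PySem.List.min? l (fun y => y) with
    | none => exact absurd ((PySem.List.min?_eq_none_iff l _).mp hmx) h
    | some m => exact ⟨m, rfl⟩
  rw [minD, hm]
  exact ⟨PySem.List.min?_mem hm, PySem.List.min?_isMin hm⟩

lemma maxD_eq (l : List Int) (h : l ≠ []) {x : Int} (hx : x ∈ l) (hb : ∀ y ∈ l, y ≤ x) :
    maxD l = x :=
  le_antisymm (hb _ (maxD_spec l h).1) ((maxD_spec l h).2 x hx)

lemma minD_eq (l : List Int) (h : l ≠ []) {x : Int} (hx : x ∈ l) (hb : ∀ y ∈ l, x ≤ y) :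
    minD l = x :=
  le_antisymm ((minD_spec l h).2 x hx) (hb _ (minD_spec l h).1)

lemma minD_le_maxD (l : List Int) (h : l ≠ []) : minD l ≤ maxD l :=
  (minD_spec l h).2 _ (maxD_spec l h).1

-- setting at the first index of x replaces one occurrence of x, as a multiset
lemma set_index_perm : ∀ (l : List Int) (x v : Int) (i : Nat),
    PySem.List.index? l x = some i → (l.set i v).Perm (v :: l.erase x)
  | [], x, v, i, h => by simp at h
  | y :: t, x, v, i, h => by
    by_cases hyx : y = x
    · subst hyx
      rw [PySem.List.index?_cons_self] at h
      cases h
      simp [List.erase_cons_head]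
    · rw [PySem.List.index?_cons_of_ne t hyx] at h
      obtain ⟨j, hj, rfl⟩ := Option.map_eq_some_iff.mp h
      have ih := set_index_perm t x v j hj
      rw [List.erase_cons_tail (by simpa using fun h' => hyx h'), List.set_cons_succ]
      exact (ih.cons y).trans (List.Perm.swap v y _)

lemma getD_of_index? {l : List Int} {x : Int} {i : Nat}
    (h : PySem.List.index? l x = some i) : l.getD i 0 = x := by
  obtain ⟨hi, hx, -⟩ := PySem.List.getElem_of_index?_eq_some h
  simp [List.getD_eq_getElem?_getD, List.getElem?_eq_getElem hi, hx]

lemma index?_some_of_mem {l : List Int} {x : Int} (h : x ∈ l) :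
    ∃ i, PySem.List.index? l x = some i := by
  have := (PySem.List.index?_isSome_iff l x).mpr h
  exact Option.isSome_iff_exists.mp this

-- dropping the last element is, as a multiset, erasing one occurrence of its value
lemma dropLast_perm_erase (t : List Int) (h : t ≠ []) :
    t.dropLast.Perm (t.erase (t.getLast h)) := by
  set v := t.getLast h with hv
  have hsplit : t = t.dropLast ++ [v] := by
    rw [hv]; exact (List.dropLast_concat_getLast h).symm
  by_cases hmem : v ∈ t.dropLast
  · have : t.erase v = t.dropLast.erase v ++ [v] := by
      conv_lhs => rw [hsplit]
      exact List.erase_append_left _ hmem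
    rw [this]
    have h1 : (t.dropLast.erase v ++ [v]).Perm (v :: t.dropLast.erase v) :=
      List.perm_append_comm.trans (by simp)
    exact (List.perm_cons_erase hmem).trans h1.symm
  · have : t.erase v = t.dropLast := by
      conv_lhs => rw [hsplit]
      rw [List.erase_append_right _ (by simpa using hmem)]
      simp
    rw [this]

-- B's insertion helper is Mathlib's orderedInsert
lemma insSorted_eq (s : List Int) (x : Int) :
    insSorted s x = List.orderedInsert (· ≤ ·) x s := by
  induction s with
  | nil => rfl
  | cons y ys ih =>
    by_cases hyx : y < x
    · simp only [insSorted, insPos, if_pos hyx, List.orderedInsert,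
        if_neg (not_le.mpr hyx)]
      simpa [insSorted] using ih
    · simp [insSorted, insPos, if_neg hyx, List.orderedInsert, if_pos (not_lt.mp hyx)]

lemma insSorted_perm (s : List Int) (x : Int) : (insSorted s x).Perm (x :: s) := by
  rw [insSorted_eq]; exact List.perm_orderedInsert _ x s

lemma insSorted_sorted {s : List Int} (x : Int) (hs : List.Pairwise (· ≤ ·) s) :
    List.Pairwise (· ≤ ·) (insSorted s x) := by
  rw [insSorted_eq]; exact List.Sorted.orderedInsert x s hs

lemma slice_eq_tail_dropLast (s : List Int) :
    PySem.List.slice s (some 1) (some (-1)) = (s.drop 1).dropLast := by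
  cases s with
  | nil => rfl
  | cons a t =>
    simp [PySem.List.slice, List.dropLast_eq_take]

-- value of the head of a sorted permutation: the minimum
lemma head_eq_minD {s l : List Int} (hp : s.Perm l) (hs : List.Pairwise (· ≤ ·) s)
    (h : l ≠ []) : (PySem.List.pyGet? s 0).getD 0 = minD l := by
  have hsne : s ≠ [] := by intro he; subst he; exact h hp.symm.eq_nil
  obtain ⟨a, t, rfl⟩ := List.exists_cons_of_ne_nil hsne
  rw [PySem.List.pyGet?_zero]
  simp only [List.getElem?_cons_zero, Option.getD_some]
  refine (minD_eq l h (hp.subset (List.mem_cons_self)) ?_).symm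
  intro y hy
  rcases List.mem_cons.mp (hp.symm.subset hy) with rfl | hyt
  · exact le_refl _
  · exact (List.pairwise_cons.mp hs).1 y hyt

lemma sorted_le_getLast : ∀ (s : List Int) (h : s ≠ []), List.Pairwise (· ≤ ·) s →
    ∀ x ∈ s, x ≤ s.getLast h
  | [a], _, _, x, hx => by simp at hx; simp [hx]
  | a :: b :: t, _, hs, x, hx => by
    rw [List.getLast_cons (List.cons_ne_nil b t)]
    rcases List.mem_cons.mp hx with rfl | hxt
    · have hb := (List.pairwise_cons.mp hs).1
      have := sorted_le_getLast (b :: t) (List.cons_ne_nil b t)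
        (List.pairwise_cons.mp hs).2 b (List.mem_cons_self)
      exact le_trans (hb b List.mem_cons_self) this
    · exact sorted_le_getLast (b :: t) (List.cons_ne_nil b t)
        (List.pairwise_cons.mp hs).2 x hxt

-- value of the last element of a sorted permutation: the maximum
lemma last_eq_maxD {s l : List Int} (hp : s.Perm l) (hs : List.Pairwise (· ≤ ·) s)
    (h : l ≠ []) : (PySem.List.pyGet? s (-1)).getD 0 = maxD l := by
  have hsne : s ≠ [] := by intro he; subst he; exact h hp.symm.eq_nil
  rw [PySem.List.pyGet?_neg_one, List.getLast?_eq_getLast hsne]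
  simp only [Option.getD_some]
  refine (maxD_eq l h (hp.subset (List.getLast_mem hsne)) ?_).symm
  intro y hy
  exact sorted_le_getLast s hsne hs y (hp.symm.subset hy)

-- a nodup list whose members are all equal to a is [a]
lemma nodup_all_eq {s : List Int} {a : Int} (hn : s.Nodup) (ha : a ∈ s)
    (hall : ∀ x ∈ s, x = a) : s = [a] := by
  cases s with
  | nil => cases ha
  | cons b t =>
    have hb : b = a := hall b List.mem_cons_self
    subst hb
    have ht : t = [] := by
      cases t with
      | nil => rfl
      | cons c u =>
        have hc : c = b := hall c (by simp)
        exact absurd (hc ▸ List.mem_cons_self) (List.nodup_cons.mp hn).1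
    rw [ht]

lemma nodup_pair_length {s : List Int} {a b : Int} (hn : s.Nodup) (ha : a ∈ s) (hb : b ∈ s)
    (hab : a ≠ b) (hall : ∀ x ∈ s, x = a ∨ x = b) : s.length = 2 := by
  cases s with
  | nil => cases ha
  | cons c t =>
    obtain ⟨hct, hnt⟩ := List.nodup_cons.mp hn
    rcases hall c List.mem_cons_self with rfl | rfl
    · have hbt : b ∈ t := by
        rcases List.mem_cons.mp hb with h' | h'
        · exact absurd h'.symm hab
        · exact h'
      have := nodup_all_eq hnt hbt (fun x hx => by
        rcases hall x (List.mem_cons_of_mem _ hx) with rfl | rfl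
        · exact absurd hx hct
        · rfl)
      simp [this]
    · have hat : a ∈ t := by
        rcases List.mem_cons.mp ha with h' | h'
        · exact absurd h' hab
        · exact h'
      have := nodup_all_eq hnt hat (fun x hx => by
        rcases hall x (List.mem_cons_of_mem _ hx) with rfl | rfl
        · rfl
        · exact absurd hx hct)
      simp [this]

-- A's break test is exactly "max - min ≤ 1"
lemma acond_iff (l : List Int) (h : l ≠ []) :
    ((PySem.Set.ofList l).length == 1 ||
      ((PySem.Set.ofList l).length == 2 &&
        ((PySem.List.max? (PySem.Set.ofList l) (fun y => y)).getD 0 -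
          (PySem.List.min? (PySem.Set.ofList l) (fun y => y)).getD 0 == 1))) = true
    ↔ maxD l - minD l ≤ 1 := by
  rw [← PySem.List.dedup_eq_ofList]
  set s := PySem.List.dedup l with hsdef
  have hmem : ∀ x, x ∈ s ↔ x ∈ l := fun x => PySem.List.mem_dedup l x
  have hnd : s.Nodup := PySem.List.nodup_dedup l
  have hM := maxD_spec l h
  have hm := minD_spec l h
  have hsne : s ≠ [] := by
    intro he
    exact absurd ((hmem _).mpr hM.1) (by simp [he])
  have hMs : maxD s = maxD l :=
    maxD_eq s hsne ((hmem _).mpr hM.1) (fun y hy => hM.2 y ((hmem y).mp hy))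
  have hms : minD s = minD l :=
    minD_eq s hsne ((hmem _).mpr hm.1) (fun y hy => hm.2 y ((hmem y).mp hy))
  simp only [Bool.or_eq_true, Bool.and_eq_true, beq_iff_eq]
  constructor
  · rintro (h1 | ⟨h2, hd⟩)
    · obtain ⟨a, ha⟩ := List.length_eq_one_iff.mp h1
      have hMa : maxD l = a := by
        have := (hmem (maxD l)).mpr hM.1
        rw [ha] at this; simpa using this
      have hma : minD l = a := by
        have := (hmem (minD l)).mpr hm.1
        rw [ha] at this; simpa using this
      omega
    · change maxD s - minD s = 1 at hd
      omega
  · intro hle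
    have hlem := minD_le_maxD l h
    rcases (by omega : maxD l - minD l = 0 ∨ maxD l - minD l = 1) with h0 | h1
    · left
      have : s = [maxD l] := nodup_all_eq hnd ((hmem _).mpr hM.1) (fun x hx => by
        have h1 := hM.2 x ((hmem x).mp hx)
        have h2 := hm.2 x ((hmem x).mp hx)
        omega)
      simp [this]
    · right
      refine ⟨?_, ?_⟩
      · refine nodup_pair_length hnd ((hmem _).mpr hm.1) ((hmem _).mpr hM.1)
          (by omega) (fun x hx => ?_)
        have h1 := hM.2 x ((hmem x).mp hx)
        have h2 := hm.2 x ((hmem x).mp hx)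
        omega
      · change maxD s - minD s = 1
        omega

-- one step of A, as a multiset operation
lemma stepA_perm (l : List Int) (h : l ≠ []) (hd : 2 ≤ maxD l - minD l) :
    ((l.set ((PySem.List.index? l (maxD l)).getD 0)
        (l.getD ((PySem.List.index? l (maxD l)).getD 0) 0 - 1)).set
      ((PySem.List.index? (l.set ((PySem.List.index? l (maxD l)).getD 0)
          (l.getD ((PySem.List.index? l (maxD l)).getD 0) 0 - 1))
        (minD (l.set ((PySem.List.index? l (maxD l)).getD 0)
          (l.getD ((PySem.List.index? l (maxD l)).getD 0) 0 - 1)))).getD 0)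
      ((l.set ((PySem.List.index? l (maxD l)).getD 0)
          (l.getD ((PySem.List.index? l (maxD l)).getD 0) 0 - 1)).getD
        ((PySem.List.index? (l.set ((PySem.List.index? l (maxD l)).getD 0)
            (l.getD ((PySem.List.index? l (maxD l)).getD 0) 0 - 1))
          (minD (l.set ((PySem.List.index? l (maxD l)).getD 0)
            (l.getD ((PySem.List.index? l (maxD l)).getD 0) 0 - 1)))).getD 0) 0 + 1)).Perm
    ((minD l + 1) :: (maxD l - 1) :: ((l.erase (maxD l)).erase (minD l))) := by
  set M := maxD l with hMdef
  set m := minD l with hmdef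
  have hM := maxD_spec l h
  have hm := minD_spec l h
  obtain ⟨i, hi⟩ := index?_some_of_mem hM.1
  rw [hi]
  simp only [Option.getD_some]
  rw [getD_of_index? hi]
  set l1 := l.set i (M - 1) with hl1def
  have hp1 : l1.Perm ((M - 1) :: l.erase M) := set_index_perm l M (M - 1) i hi
  have hl1ne : l1 ≠ [] := by
    intro he
    have := hp1.length_eq
    rw [he] at this
    simp at this
  have hmM : m + 2 ≤ M := by omega
  have hmem_erase : m ∈ l.erase M := (List.mem_erase_of_ne (by omega)).mpr hm.1
  have hmin1 : minD l1 = m := by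
    refine minD_eq l1 hl1ne (hp1.mem_iff.mpr (List.mem_cons_of_mem _ hmem_erase)) ?_
    intro y hy
    rcases List.mem_cons.mp (hp1.mem_iff.mp hy) with rfl | hyt
    · omega
    · exact hm.2 y (List.mem_of_mem_erase hyt)
  rw [hmin1]
  obtain ⟨j, hj⟩ := index?_some_of_mem
    (hp1.mem_iff.mpr (List.mem_cons_of_mem _ hmem_erase))
  rw [hj]
  simp only [Option.getD_some]
  rw [getD_of_index? hj]
  have hp2 : (l1.set j (m + 1)).Perm ((m + 1) :: l1.erase m) :=
    set_index_perm l1 m (m + 1) j hj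
  refine hp2.trans (List.Perm.cons _ ?_)
  have : (l1.erase m).Perm (((M - 1) :: l.erase M).erase m) := hp1.erase m
  rw [List.erase_cons_tail (by simp; omega)] at this
  exact this

-- one step of B, as the same multiset operation, staying sorted
lemma stepB (s l : List Int) (hp : s.Perm l) (hs : List.Pairwise (· ≤ ·) s)
    (h : l ≠ []) (hd : 2 ≤ maxD l - minD l) :
    (insSorted (insSorted (PySem.List.slice s (some 1) (some (-1)))
        ((PySem.List.pyGet? s 0).getD 0 + 1)) ((PySem.List.pyGet? s (-1)).getD 0 - 1)).Perm
      ((minD l + 1) :: (maxD l - 1) :: ((l.erase (maxD l)).erase (minD l))) ∧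
    List.Pairwise (· ≤ ·) (insSorted (insSorted (PySem.List.slice s (some 1) (some (-1)))
        ((PySem.List.pyGet? s 0).getD 0 + 1)) ((PySem.List.pyGet? s (-1)).getD 0 - 1)) := by
  set M := maxD l with hMdef
  set m := minD l with hmdef
  have hhead := head_eq_minD hp hs h
  have hlast := last_eq_maxD hp hs h
  rw [hhead, hlast, slice_eq_tail_dropLast]
  have hsne : s ≠ [] := by intro he; subst he; exact h hp.symm.eq_nil
  obtain ⟨a, t, rfl⟩ := List.exists_cons_of_ne_nil hsne
  have ha : a = m := by
    have := head_eq_minD hp hs h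
    rw [PySem.List.pyGet?_zero] at this
    simpa using this
  subst ha
  have htne : t ≠ [] := by
    intro he
    subst he
    have hMmem := (maxD_spec l h).1
    have := hp.symm.subset hMmem
    simp at this
    omega
  have hlastt : t.getLast htne = M := by
    have := last_eq_maxD hp hs h
    rw [PySem.List.pyGet?_neg_one,
      List.getLast?_eq_getLast (List.cons_ne_nil _ _)] at this
    simp only [Option.getD_some] at this
    rw [List.getLast_cons htne] at this
    exact this
  have hst : List.Pairwise (· ≤ ·) t := (List.pairwise_cons.mp hs).2
  have hdrop : (List.drop 1 (m :: t)) = t := by simp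
  rw [hdrop]
  have hpt : t.Perm (l.erase m) := by
    have : (l.erase m).Perm ((m :: t).erase m) := (hp.symm).erase m
    rw [List.erase_cons_head] at this
    exact this.symm
  have hperm_body : t.dropLast.Perm ((l.erase M).erase m) := by
    have h1 : t.dropLast.Perm (t.erase M) := hlastt ▸ dropLast_perm_erase t htne
    have h2 : (t.erase M).Perm ((l.erase m).erase M) := hpt.erase M
    rw [List.erase_comm] at h2
    exact h1.trans h2
  constructor
  · have p1 : (insSorted t.dropLast (m + 1)).Perm ((m + 1) :: t.dropLast) :=
      insSorted_perm _ _
    have p2 : (insSorted (insSorted t.dropLast (m + 1)) (M - 1)).Perm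
        ((M - 1) :: insSorted t.dropLast (m + 1)) := insSorted_perm _ _
    refine p2.trans ?_
    refine (List.Perm.cons _ p1).trans ?_
    refine ((List.Perm.swap (m + 1) (M - 1) _).symm).symm.trans ?_
    exact (List.Perm.cons _ (List.Perm.cons _ hperm_body)).symm.symm
  · exact insSorted_sorted _ (insSorted_sorted _
      (List.Pairwise.sublist (List.dropLast_sublist t) hst))

-- the two loops in lockstep: B's state is a sorted permutation of A's state
lemma loop_sim : ∀ (k : Nat) (l s : List Int), l ≠ [] → s.Perm l →
    List.Pairwise (· ≤ ·) s →
    (solutionAltGo k s).Perm (solutionGo k l) ∧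
    List.Pairwise (· ≤ ·) (solutionAltGo k s) ∧ solutionGo k l ≠ []
  | 0, l, s, h, hp, hs => ⟨hp, hs, h⟩
  | Nat.succ rest, l, s, h, hp, hs => by
    have hhead := head_eq_minD hp hs h
    have hlast := last_eq_maxD hp hs h
    by_cases hcond : maxD l - minD l ≤ 1
    · -- both loops stop
      have hA : solutionGo (rest + 1) l = l := by
        rw [solutionGo, if_pos ((acond_iff l h).mpr hcond)]
      have hB : solutionAltGo (rest + 1) s = s := by
        rw [solutionAltGo, if_neg (by rw [hlast, hhead]; omega)]
      rw [hA, hB]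
      exact ⟨hp, hs, h⟩
    · push_neg at hcond
      have hd : 2 ≤ maxD l - minD l := hcond
      have hA : solutionGo (rest + 1) l =
          solutionGo rest ((l.set ((PySem.List.index? l (maxD l)).getD 0)
            (l.getD ((PySem.List.index? l (maxD l)).getD 0) 0 - 1)).set
          ((PySem.List.index? (l.set ((PySem.List.index? l (maxD l)).getD 0)
              (l.getD ((PySem.List.index? l (maxD l)).getD 0) 0 - 1))
            (minD (l.set ((PySem.List.index? l (maxD l)).getD 0)
              (l.getD ((PySem.List.index? l (maxD l)).getD 0) 0 - 1)))).getD 0)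
          ((l.set ((PySem.List.index? l (maxD l)).getD 0)
              (l.getD ((PySem.List.index? l (maxD l)).getD 0) 0 - 1)).getD
            ((PySem.List.index? (l.set ((PySem.List.index? l (maxD l)).getD 0)
                (l.getD ((PySem.List.index? l (maxD l)).getD 0) 0 - 1))
              (minD (l.set ((PySem.List.index? l (maxD l)).getD 0)
                (l.getD ((PySem.List.index? l (maxD l)).getD 0) 0 - 1)))).getD 0) 0 + 1)) := by
        rw [solutionGo, if_neg (by
          intro hc
          exact absurd ((acond_iff l h).mp hc) (by omega))]
        rfl
      have hB : solutionAltGo (rest + 1) s =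
          solutionAltGo rest (insSorted (insSorted
            (PySem.List.slice s (some 1) (some (-1)))
            ((PySem.List.pyGet? s 0).getD 0 + 1))
            ((PySem.List.pyGet? s (-1)).getD 0 - 1)) := by
        rw [solutionAltGo, if_pos (by rw [hlast, hhead]; omega)]
      rw [hA, hB]
      have hstepA := stepA_perm l h hd
      have hstepB := stepB s l hp hs h hd
      have hl2ne : ((l.set ((PySem.List.index? l (maxD l)).getD 0)
            (l.getD ((PySem.List.index? l (maxD l)).getD 0) 0 - 1)).set
          ((PySem.List.index? (l.set ((PySem.List.index? l (maxD l)).getD 0)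
              (l.getD ((PySem.List.index? l (maxD l)).getD 0) 0 - 1))
            (minD (l.set ((PySem.List.index? l (maxD l)).getD 0)
              (l.getD ((PySem.List.index? l (maxD l)).getD 0) 0 - 1)))).getD 0)
          ((l.set ((PySem.List.index? l (maxD l)).getD 0)
              (l.getD ((PySem.List.index? l (maxD l)).getD 0) 0 - 1)).getD
            ((PySem.List.index? (l.set ((PySem.List.index? l (maxD l)).getD 0)
                (l.getD ((PySem.List.index? l (maxD l)).getD 0) 0 - 1))
              (minD (l.set ((PySem.List.index? l (maxD l)).getD 0)
                (l.getD ((PySem.List.index? l (maxD l)).getD 0) 0 - 1)))).getD 0) 0 + 1)) ≠ [] := by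
        intro he
        have := hstepA.length_eq
        rw [he] at this
        simp at this
      exact loop_sim rest _ _ hl2ne (hstepB.1.trans hstepA.symm) hstepB.2

-- ===== VERDICT (by name: the statement is the Claim_ definition above) =====
theorem solution_spec : Claim_equal_solution := by
  intro n boxes _ hpre
  unfold Spec_solution solution solution_alt
  show (PySem.List.max? (solutionGo n.toNat boxes) (fun y => y)).getD 0 -
      (PySem.List.min? (solutionGo n.toNat boxes) (fun y => y)).getD 0 =
    (PySem.List.pyGet? (solutionAltGo n.toNat (PySem.List.sorted boxes (fun x => x) false)) (-1)).getD 0 -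
      (PySem.List.pyGet? (solutionAltGo n.toNat (PySem.List.sorted boxes (fun x => x) false)) 0).getD 0
  have hsp : (PySem.List.sorted boxes (fun x => x) false).Perm boxes :=
    PySem.List.sorted_perm boxes _ _
  have hss : List.Pairwise (· ≤ ·) (PySem.List.sorted boxes (fun x => x) false) :=
    PySem.List.sorted_pairwise boxes (fun x => x)
  obtain ⟨hperm, hsort, hne⟩ :=
    loop_sim n.toNat boxes (PySem.List.sorted boxes (fun x => x) false) hpre hsp hss
  rw [last_eq_maxD hperm hsort hne, head_eq_minD hperm hsort hne]
  rfl
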